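-- pv_equiv track=rewrite | github.com/FreakyRafiki/Portfolio-Repository | Ramsey-in-Graph-Theory/utils.py | is_forbidden
-- ===== SOURCE A (Python) =====
-- def has_clique(vertices, coloring, color, size):
--     if size == 0:
--         return True
--     if len(vertices) < size:
--         return False
--     v = next(iter(vertices))
--     rest = vertices - {v}
--     color_neighbors = frozenset(
--         w for w in rest
--         if coloring.get(_edge(v, w)) == color
--     )
--     if has_clique(color_neighbors, coloring, color, size - 1):
--         return True
--     return has_clique(rest, coloring, color, size)
--
-- def _edge(u, v):
--     return (u, v) if u < v else (v, u)
--
-- def is_forbidden(u, v, color, coloring, n_clique):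
--     if n_clique <= 2:
--         return False
--     colored_with_u = {
--         w for (a, b), c in coloring.items()
--         if c == color and (a == u or b == u)
--         for w in ([b] if a == u else [a])
--     }
--     colored_with_v = {
--         w for (a, b), c in coloring.items()
--         if c == color and (a == v or b == v)
--         for w in ([b] if a == v else [a])
--     }
--     W = frozenset(colored_with_u & colored_with_v)
--
--     return has_clique(W, coloring, color, n_clique - 2)
-- ===== SOURCE B (Python) =====
-- def _edge(u, v):
--     return (u, v) if u < v else (v, u)
--
-- def _combos(k, xs):
--     # all k-element sublists of xs, in order
--     if k == 0:
--         return [[]]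
--     if not xs:
--         return []
--     x, rest = xs[0], xs[1:]
--     return [[x] + c for c in _combos(k - 1, rest)] + _combos(k, rest)
--
-- def _all_mono(comb, coloring, color):
--     if not comb:
--         return True
--     a, rest = comb[0], comb[1:]
--     return all(coloring.get(_edge(a, b)) == color for b in rest) and _all_mono(rest, coloring, color)
--
-- def is_forbidden(u, v, color, coloring, n_clique):
--     if n_clique <= 2:
--         return False
--     colored_with_u = {
--         w for (a, b), c in coloring.items()
--         if c == color and (a == u or b == u)
--         for w in ([b] if a == u else [a])
--     }
--     colored_with_v = {
--         w for (a, b), c in coloring.items()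
--         if c == color and (a == v or b == v)
--         for w in ([b] if a == v else [a])
--     }
--     W = list(colored_with_u & colored_with_v)
--     return any(_all_mono(c, coloring, color) for c in _combos(n_clique - 2, W))
-- ===== Notes on version B (the rewrite author's own statement) =====
-- stated objective: alternative
-- what changed: The pruned branching recursion has_clique (pick a vertex, recurse on its monochromatic neighbourhood or skip it) is replaced by flat exhaustive enumeration: generate every k-element subset of W and test each candidate's pairs for the colour; the W construction is kept.
import Mathlib
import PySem

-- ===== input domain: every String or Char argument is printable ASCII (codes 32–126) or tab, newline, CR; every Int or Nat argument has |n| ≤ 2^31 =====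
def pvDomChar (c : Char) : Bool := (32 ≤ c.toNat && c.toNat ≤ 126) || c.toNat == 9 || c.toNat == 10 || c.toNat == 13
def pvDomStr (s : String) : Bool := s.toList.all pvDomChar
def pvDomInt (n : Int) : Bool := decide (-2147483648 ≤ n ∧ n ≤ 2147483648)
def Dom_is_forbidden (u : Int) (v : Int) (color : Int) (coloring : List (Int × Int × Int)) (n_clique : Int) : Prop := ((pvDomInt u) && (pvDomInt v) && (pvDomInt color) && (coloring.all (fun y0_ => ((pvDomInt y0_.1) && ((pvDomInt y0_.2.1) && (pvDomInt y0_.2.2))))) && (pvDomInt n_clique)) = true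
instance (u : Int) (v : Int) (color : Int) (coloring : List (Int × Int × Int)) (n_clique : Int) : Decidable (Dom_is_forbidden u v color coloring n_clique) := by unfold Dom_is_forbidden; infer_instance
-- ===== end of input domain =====

-- ===== PORT A =====
-- B replaces A's pruned recursive clique search by flat k-subset enumeration; same W construction; return values proved equal.
-- Shared helpers (B's Python copies A's _edge and the colored_with_u/colored_with_v/W comprehensions verbatim):
def pyEdge (a b : Int) : Int × Int := if a < b then (a, b) else (b, a)

-- the coloring dict argument: List (Int,Int,color) read as Python dict insertion (later duplicate keys overwrite)
def toColorDict (coloring : List (Int × Int × Int)) : PySem.Dict (Int × Int) Int :=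
  PySem.Dict.ofList (coloring.map (fun t => ((t.1, t.2.1), t.2.2)))

-- coloring.get(_edge(a, b)) == color
def monoEdge (d : PySem.Dict (Int × Int) Int) (color a b : Int) : Bool :=
  d.get? (pyEdge a b) == some color

-- the set comprehension building colored_with_x
def coloredWith (d : PySem.Dict (Int × Int) Int) (color x : Int) : PySem.Set Int :=
  d.items.foldl (fun s p =>
    if p.2 == color && (p.1.1 == x || p.1.2 == x) then
      PySem.Set.add s (if p.1.1 == x then p.1.2 else p.1.1)
    else s) PySem.Set.empty

-- A's has_clique (set iteration order does not affect the Bool result; head plays next(iter(.)))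
def hasClique (d : PySem.Dict (Int × Int) Int) (color : Int) (vertices : List Int) (size : Int) : Bool :=
  if size = 0 then true
  else if (vertices.length : Int) < size then false
  else match vertices with
    | [] => false  -- unreachable from is_forbidden (would need size < 0; Python would raise StopIteration)
    | v :: rest =>
      let color_neighbors := rest.filter (fun w => monoEdge d color v w)
      if hasClique d color color_neighbors (size - 1) then true
      else hasClique d color rest size
termination_by vertices.length
decreasing_by
  · simpa using Nat.lt_succ_of_le (List.length_filter_le _ _)
  · simp

def is_forbidden (u : Int) (v : Int) (color : Int) (coloring : List (Int × Int × Int)) (n_clique : Int) : Bool :=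
  if n_clique ≤ 2 then false
  else
    let d := toColorDict coloring
    let W := PySem.Set.inter (coloredWith d color u) (coloredWith d color v)
    hasClique d color W (n_clique - 2)

-- ===== PORT B =====
-- _combos k xs: all k-element sublists of xs, in order
def combosB (k : Nat) (xs : List Int) : List (List Int) :=
  match k, xs with
  | 0, _ => [[]]
  | _+1, [] => []
  | k+1, x :: rest => (combosB k rest).map (fun c => x :: c) ++ combosB (k+1) rest

-- _all_mono comb: every pair in comb is colored `color`
def allMonoB (d : PySem.Dict (Int × Int) Int) (color : Int) : List Int → Bool
  | [] => true
  | a :: rest => rest.all (fun b => monoEdge d color a b) && allMonoB d color rest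

def is_forbidden_alt (u : Int) (v : Int) (color : Int) (coloring : List (Int × Int × Int)) (n_clique : Int) : Bool :=
  if n_clique ≤ 2 then false
  else
    let d := toColorDict coloring
    let W := PySem.Set.inter (coloredWith d color u) (coloredWith d color v)
    -- toNat is exact here: 2 < n_clique so n_clique - 2 ≥ 1
    (combosB (n_clique - 2).toNat W).any (fun c => allMonoB d color c)

-- ===== PRECONDITION & SPEC =====
def Spec_is_forbidden (u : Int) (v : Int) (color : Int) (coloring : List (Int × Int × Int)) (n_clique : Int) (out : Bool) : Prop := out = is_forbidden_alt u v color coloring n_clique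
instance (u : Int) (v : Int) (color : Int) (coloring : List (Int × Int × Int)) (n_clique : Int) (out : Bool) : Decidable (Spec_is_forbidden u v color coloring n_clique out) := by unfold Spec_is_forbidden; infer_instance

-- ===== CLAIM (what is proved, stated in full; the proofs are below) =====
def Claim_equal_is_forbidden : Prop := ∀ (u : Int) (v : Int) (color : Int) (coloring : List (Int × Int × Int)) (n_clique : Int), Dom_is_forbidden u v color coloring n_clique → Spec_is_forbidden u v color coloring n_clique (is_forbidden u v color coloring n_clique)

-- ===== LEMMAS AND PROOFS =====
lemma allMonoB_iff (d : PySem.Dict (Int × Int) Int) (color : Int) (l : List Int) :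
    allMonoB d color l = true ↔ l.Pairwise (fun a b => monoEdge d color a b = true) := by
  induction l with
  | nil => simp [allMonoB]
  | cons a rest ih => simp [allMonoB, List.pairwise_cons, ih, List.all_eq_true, and_comm]

lemma mem_combosB : ∀ (xs : List Int) (k : Nat) (sub : List Int),
    sub ∈ combosB k xs ↔ sub.Sublist xs ∧ sub.length = k := by
  intro xs
  induction xs with
  | nil =>
    intro k sub
    cases k with
    | zero => simp [combosB, List.sublist_nil, List.length_eq_zero_iff]
    | succ k =>
      simp only [combosB, List.not_mem_nil, false_iff, not_and]
      intro h; simp [List.sublist_nil.mp h]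
  | cons x rest ih =>
    intro k sub
    cases k with
    | zero =>
      simp only [combosB, List.mem_singleton]
      constructor
      · rintro rfl; exact ⟨List.nil_sublist _, rfl⟩
      · rintro ⟨-, h⟩; exact List.length_eq_zero_iff.mp h
    | succ k =>
      simp only [combosB, List.mem_append, List.mem_map, ih]
      constructor
      · rintro (⟨c, ⟨hc, hlen⟩, rfl⟩ | ⟨hs, hlen⟩)
        · exact ⟨List.Sublist.cons₂ x hc, by simp [hlen]⟩
        · exact ⟨hs.cons x, hlen⟩
      · rintro ⟨hs, hlen⟩
        rcases List.sublist_cons_iff.mp hs with h | ⟨r, rfl, hr⟩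
        · exact Or.inr ⟨h, hlen⟩
        · exact Or.inl ⟨r, ⟨hr, by simpa using hlen⟩, rfl⟩

lemma hasClique_iff (d : PySem.Dict (Int × Int) Int) (color : Int) :
    ∀ (n : Nat) (xs : List Int), xs.length ≤ n → ∀ s : Int, 0 ≤ s →
      (hasClique d color xs s = true ↔
        ∃ sub : List Int, sub.Sublist xs ∧ (sub.length : Int) = s ∧
          sub.Pairwise (fun a b => monoEdge d color a b = true)) := by
  intro n
  induction n with
  | zero =>
    intro xs hxs s hs
    have hx : xs = [] := List.length_eq_zero_iff.mp (Nat.le_zero.mp hxs)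
    subst hx
    by_cases h0 : s = 0
    · subst h0
      rw [hasClique.eq_def, if_pos rfl]
      exact iff_of_true rfl ⟨[], List.nil_sublist _, rfl, List.Pairwise.nil⟩
    · rw [hasClique.eq_def]
      simp only [if_neg h0]
      rw [if_pos (by simpa using lt_of_le_of_ne hs (Ne.symm h0))]
      simp only [Bool.false_eq_true, false_iff, not_exists]
      rintro sub ⟨hsub, hlen, -⟩
      simp [List.sublist_nil.mp hsub] at hlen
      omega
  | succ n ih =>
    intro xs hxs s hs
    by_cases h0 : s = 0
    · subst h0
      rw [hasClique.eq_def, if_pos rfl]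
      exact iff_of_true rfl ⟨[], List.nil_sublist _, rfl, List.Pairwise.nil⟩
    · have hs1 : 1 ≤ s := lt_of_le_of_ne hs (Ne.symm h0)
      rw [hasClique.eq_def]
      simp only [if_neg h0]
      by_cases hlt : (xs.length : Int) < s
      · rw [if_pos hlt]
        simp only [Bool.false_eq_true, false_iff, not_exists]
        rintro sub ⟨hsub, hlen, -⟩
        have := hsub.length_le
        omega
      · rw [if_neg hlt]
        obtain ⟨v, rest, rfl⟩ : ∃ v rest, xs = v :: rest := by
          cases xs with
          | nil => exfalso; simp at hlt; omega
          | cons a l => exact ⟨a, l, rfl⟩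
        show (if hasClique d color (rest.filter (fun w => monoEdge d color v w)) (s - 1) = true
            then true else hasClique d color rest s) = true ↔ _
        have hrest : rest.length ≤ n := by simpa using hxs
        have hnb : (rest.filter (fun w => monoEdge d color v w)).length ≤ n :=
          le_trans (List.length_filter_le _ _) hrest
        by_cases h1 : hasClique d color (rest.filter (fun w => monoEdge d color v w)) (s - 1) = true
        · simp only [h1, if_pos, true_iff]
          rcases (ih _ hnb (s - 1) (by omega)).mp h1 with ⟨sub, hsub, hlen, hpw⟩
          refine ⟨v :: sub, List.Sublist.cons₂ v (hsub.trans List.filter_sublist), by simp; omega, ?_⟩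
          rw [List.pairwise_cons]
          refine ⟨fun w hw => ?_, hpw⟩
          have := List.of_mem_filter (hsub.mem hw)
          simpa using this
        · rw [if_neg h1, ih rest hrest s hs]
          constructor
          · rintro ⟨sub, hsub, hlen, hpw⟩
            exact ⟨sub, hsub.cons v, hlen, hpw⟩
          · rintro ⟨sub, hsub, hlen, hpw⟩
            rcases List.sublist_cons_iff.mp hsub with h | ⟨r, rfl, hr⟩
            · exact ⟨sub, h, hlen, hpw⟩
            · exfalso
              rw [List.pairwise_cons] at hpw
              have hrf : List.Sublist r (rest.filter (fun w => monoEdge d color v w)) := by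
                have heq : r.filter (fun w => monoEdge d color v w) = r :=
                  List.filter_eq_self.mpr (fun w hw => hpw.1 w hw)
                have h2 : List.Sublist (r.filter (fun w => monoEdge d color v w))
                    (rest.filter (fun w => monoEdge d color v w)) := hr.filter _
                rwa [heq] at h2
              exact h1 ((ih _ hnb (s - 1) (by omega)).mpr
                ⟨r, hrf, by simp at hlen ⊢; omega, hpw.2⟩)

-- ===== VERDICT (by name: the statement is the Claim_ definition above) =====
theorem is_forbidden_spec : Claim_equal_is_forbidden := by
  intro u v color coloring n_clique _
  unfold Spec_is_forbidden is_forbidden is_forbidden_alt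
  by_cases h2 : n_clique ≤ 2
  · simp [h2]
  · rw [if_neg h2, if_neg h2]
    set d := toColorDict coloring
    set W := PySem.Set.inter (coloredWith d color u) (coloredWith d color v) with hW
    rw [Bool.eq_iff_iff]
    rw [hasClique_iff d color W.length W le_rfl (n_clique - 2) (by omega)]
    rw [List.any_eq_true]
    constructor
    · rintro ⟨sub, hsub, hlen, hpw⟩
      exact ⟨sub, (mem_combosB W _ sub).mpr ⟨hsub, by omega⟩, (allMonoB_iff d color sub).mpr hpw⟩
    · rintro ⟨sub, hmem, hall⟩
      rcases (mem_combosB W _ sub).mp hmem with ⟨hsub, hlen⟩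
      exact ⟨sub, hsub, by omega, (allMonoB_iff d color sub).mp hall⟩
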